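-- pv_equiv track=rewrite | github.com/fremont222/projet | pythonProject/EssaiHTML/v3.py | str_list_to_bool_list
-- ===== SOURCE A (Python) =====
-- def str_list_to_bool_list(str_list):
--     mapping = {"An": 0, "CA": 1, "AA": 2}
--     bool_list = [False] * len(mapping)
--     for str_value in str_list:
--         if str_value in mapping:
--             index = mapping[str_value]
--             bool_list[index] = True
--     return bool_list
-- ===== SOURCE B (Python) =====
-- def str_list_to_bool_list(str_list):
--     present = set(str_list)
--     return [k in present for k in ("An", "CA", "AA")]
-- ===== Notes on version B (the rewrite author's own statement) =====
-- stated objective: simpler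
-- what changed: B builds a membership set once and iterates over the fixed key vocabulary (An, CA, AA) testing membership, instead of iterating over the input and writing flags into a pre-zeroed list via a dict index.
import Mathlib
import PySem

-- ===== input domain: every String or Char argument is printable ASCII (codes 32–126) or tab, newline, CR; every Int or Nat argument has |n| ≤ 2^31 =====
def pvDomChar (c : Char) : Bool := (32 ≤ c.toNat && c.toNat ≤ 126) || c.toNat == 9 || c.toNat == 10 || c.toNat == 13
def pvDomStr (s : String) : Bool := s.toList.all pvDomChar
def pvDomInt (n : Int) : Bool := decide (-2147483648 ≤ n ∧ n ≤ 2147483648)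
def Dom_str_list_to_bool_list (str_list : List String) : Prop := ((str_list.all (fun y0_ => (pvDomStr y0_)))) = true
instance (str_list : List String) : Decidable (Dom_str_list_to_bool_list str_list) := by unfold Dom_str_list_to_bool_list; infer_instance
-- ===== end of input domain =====

-- B is simpler: it builds a membership set of the input once and maps over the fixed keys ("An","CA","AA") testing membership, instead of writing flags into a pre-zeroed list via a dict index.


-- ===== PORT A =====
-- loop body of A's for-loop, as a named helper
def strListStep (mapping : PySem.Dict String Int) (bl : List Bool) (str_value : String) : List Bool :=
  if PySem.Dict.contains mapping str_value then
    let index := PySem.Dict.getD mapping str_value 0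
    PySem.List.pySetD bl index true
  else bl

def str_list_to_bool_list (str_list : List String) : List Bool :=
  let mapping : PySem.Dict String Int := PySem.Dict.ofList [("An", 0), ("CA", 1), ("AA", 2)]
  let bool_list : List Bool := List.replicate (PySem.Dict.size mapping) false
  str_list.foldl (strListStep mapping) bool_list

-- ===== PORT B =====
def str_list_to_bool_list_alt (str_list : List String) : List Bool :=
  let present : PySem.Set String := PySem.Set.ofList str_list
  ["An", "CA", "AA"].map (fun k => PySem.Set.contains present k)

-- ===== PRECONDITION & SPEC =====
def Spec_str_list_to_bool_list (str_list : List String) (out : List Bool) : Prop := out = str_list_to_bool_list_alt str_list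
instance (str_list : List String) (out : List Bool) : Decidable (Spec_str_list_to_bool_list str_list out) := by unfold Spec_str_list_to_bool_list; infer_instance

-- ===== CLAIM (what is proved, stated in full; the proofs are below) =====
def Claim_equal_str_list_to_bool_list : Prop := ∀ (str_list : List String), Dom_str_list_to_bool_list str_list → Spec_str_list_to_bool_list str_list (str_list_to_bool_list str_list)

-- ===== LEMMAS AND PROOFS =====

-- ===== VERDICT (by name: the statement is the Claim_ definition above) =====
-- Step lemmas: what one iteration of A's loop does to a 3-element flag list.
theorem step_An (a b c : Bool) :
    strListStep (PySem.Dict.ofList [("An", 0), ("CA", 1), ("AA", 2)]) [a, b, c] "An" = [true, b, c] := rfl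

theorem step_CA (a b c : Bool) :
    strListStep (PySem.Dict.ofList [("An", 0), ("CA", 1), ("AA", 2)]) [a, b, c] "CA" = [a, true, c] := rfl

theorem step_AA (a b c : Bool) :
    strListStep (PySem.Dict.ofList [("An", 0), ("CA", 1), ("AA", 2)]) [a, b, c] "AA" = [a, b, true] := rfl

theorem step_other (bl : List Bool) (s : String)
    (h1 : s ≠ "An") (h2 : s ≠ "CA") (h3 : s ≠ "AA") :
    strListStep (PySem.Dict.ofList [("An", 0), ("CA", 1), ("AA", 2)]) bl s = bl := by
  have hc : (PySem.Dict.ofList [("An", (0:Int)), ("CA", 1), ("AA", 2)]).contains s = false := by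
    simp [PySem.Dict.ofList, PySem.Dict.contains, PySem.Dict.get?, beq_iff_eq,
      PySem.Dict.update, PySem.Dict.insert, PySem.Dict.empty]
    exact ⟨fun h => h1 h.symm, fun h => h2 h.symm, fun h => h3 h.symm⟩
  simp [strListStep, hc]

-- Loop invariant for A's fold: starting from flags [a, b, c], each flag ends up
-- OR-ed with whether its key occurs in the remaining input.
theorem foldA_eq (l : List String) (a b c : Bool) :
    l.foldl (strListStep (PySem.Dict.ofList [("An", 0), ("CA", 1), ("AA", 2)])) [a, b, c]
    = [a || l.contains "An", b || l.contains "CA", c || l.contains "AA"] := by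
  induction l generalizing a b c with
  | nil => simp
  | cons s t ih =>
    simp only [List.foldl_cons]
    by_cases h1 : s = "An"
    · subst h1; rw [step_An, ih]; simp
    · by_cases h2 : s = "CA"
      · subst h2; rw [step_CA, ih]; simp
      · by_cases h3 : s = "AA"
        · subst h3; rw [step_AA, ih]; simp
        · rw [step_other _ _ h1 h2 h3, ih]
          simp [h1, h2, h3, Ne.symm]

-- ===== VERDICT (by name: the statement is the Claim_ definition above) =====
theorem str_list_to_bool_list_spec : Claim_equal_str_list_to_bool_list := by
  intro str_list _
  unfold Spec_str_list_to_bool_list str_list_to_bool_list str_list_to_bool_list_alt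
  show List.foldl _ [false, false, false] str_list = _
  rw [foldA_eq]
  simp [List.contains_iff_mem, PySem.Set.mem_ofList]
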